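-- pv_equiv track=rewrite | github.com/ccctw-ma/leetcode | src/Difficult/DynamicTest/deleteString.py | deleteString3
-- ===== SOURCE A (Python) =====
-- def deleteString3(s: str) -> int:
--     n = len(s)
--     if len(set(s)) == 1: return n  # 特判全部相同的情况
--     lcp = [[0] * (n + 1) for _ in range(n + 1)]  # lcp[i][j] 表示 s[i:] 和 s[j:] 的最长公共前缀
--     for i in range(n - 1, -1, -1):
--         for j in range(n - 1, i, -1):
--             if s[i] == s[j]:
--                 lcp[i][j] = lcp[i + 1][j + 1] + 1
--     f = [0] * n
--     for i in range(n - 1, -1, -1):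
--         for j in range(1, (n - i) // 2 + 1):
--             if lcp[i][i + j] >= j:  # 说明 s[i:i+j] == s[i+j:i+2*j]
--                 f[i] = max(f[i], f[i + j])
--         f[i] += 1
--     return f[0]
-- ===== SOURCE B (Python) =====
-- def deleteString3(s: str) -> int:
--     n = len(s)
--     if len(set(s)) == 1:
--         return n  # all characters identical
--     f = []  # f[t] corresponds to index i+1+t of A's table; built back-to-front
--     for i in range(n - 1, -1, -1):
--         best = 0
--         for j in range(1, (n - i) // 2 + 1):
--             if s[i:i + j] == s[i + j:i + 2 * j] and f[j - 1] > best: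
--                 best = f[j - 1]
--         f = [best + 1] + f
--     return f[0]
-- ===== Notes on version B (the rewrite author's own statement) =====
-- stated objective: simpler
-- what changed: B drops A's precomputed O(n^2) LCP table and tests block equality directly with slice comparison inside the DP, and builds the DP values as a list grown back-to-front by prepending (indexed relative to i) instead of index-assignment into a preallocated array.
import Mathlib
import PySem

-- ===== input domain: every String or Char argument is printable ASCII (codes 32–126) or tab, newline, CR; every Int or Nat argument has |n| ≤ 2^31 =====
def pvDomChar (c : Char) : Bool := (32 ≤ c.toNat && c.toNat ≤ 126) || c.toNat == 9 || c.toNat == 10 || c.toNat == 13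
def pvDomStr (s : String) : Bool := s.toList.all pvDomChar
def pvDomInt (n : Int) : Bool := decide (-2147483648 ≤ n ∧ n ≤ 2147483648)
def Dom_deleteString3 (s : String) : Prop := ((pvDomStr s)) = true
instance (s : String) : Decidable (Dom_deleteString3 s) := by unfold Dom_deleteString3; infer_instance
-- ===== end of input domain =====

-- B replaces A's precomputed LCP table by direct slice comparison in the DP and builds
-- the DP list back-to-front by prepending (objective: simpler).

-- ===== PORT A =====
-- lcp[i][j] read: table entry with default 0 (all reads are in range in A)
def getE (t : List (List Int)) (i j : Nat) : Int := (t.getD i []).getD j 0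

-- body of the inner table loop: 'if s[i] == s[j]: lcp[i][j] = lcp[i+1][j+1] + 1'
-- (s[i]/s[j] read via getD: both indices are in range on every call A makes)
def aStep (cs : List Char) (i j : Nat) (t : List (List Int)) : List (List Int) :=
  if cs.getD i ' ' = cs.getD j ' ' then
    t.set i ((t.getD i []).set j (getE t (i+1) (j+1) + 1))
  else t

-- 'for j in range(n-1, i, -1)': j descending down to i+1
def aInner (cs : List Char) (i : Nat) (j : Nat) (t : List (List Int)) : List (List Int) :=
  if j ≤ i then t
  else aInner cs i (j-1) (aStep cs i j t)
termination_by j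
decreasing_by omega

-- 'for i in range(n-1, -1, -1)' of the table build
def aOuter (cs : List Char) (n : Nat) : Nat → List (List Int) → List (List Int)
  | 0, t => aInner cs 0 (n-1) t
  | i+1, t => aOuter cs n i (aInner cs (i+1) (n-1) t)

-- 'for j in range(1, (n-i)//2+1): if lcp[i][i+j] >= j: f[i] = max(f[i], f[i+j])'
def aFInner (t : List (List Int)) (i jmax j : Nat) (f : List Int) : List Int :=
  if j > jmax then f
  else aFInner t i jmax (j+1)
    (if (j : Int) ≤ getE t i (i+j) then f.set i (max (f.getD i 0) (f.getD (i+j) 0)) else f)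
termination_by jmax + 1 - j
decreasing_by omega

-- 'for i in range(n-1, -1, -1)' of the DP, ending each iteration with 'f[i] += 1'
def aFOuter (t : List (List Int)) (n : Nat) : Nat → List Int → List Int
  | 0, f =>
      let f' := aFInner t 0 (n / 2) 1 f
      f'.set 0 (f'.getD 0 0 + 1)
  | i+1, f =>
      let f' := aFInner t (i+1) ((n - (i+1)) / 2) 1 f
      aFOuter t n i (f'.set (i+1) (f'.getD (i+1) 0 + 1))

def deleteString3 (s : String) : Int :=
  let cs := s.toList
  let n := cs.length
  if (PySem.Set.ofList cs).length = 1 then (n : Int)   -- 'if len(set(s)) == 1: return n'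
  else
    let lcp0 := List.replicate (n+1) (List.replicate (n+1) (0 : Int))
    let lcp := if n = 0 then lcp0 else aOuter cs n (n-1) lcp0   -- guard: range is empty for n = 0
    let f := if n = 0 then ([] : List Int) else aFOuter lcp n (n-1) (List.replicate n 0)
    (PySem.List.pyGet? f 0).getD 0   -- final return: first DP value; none = IndexError, excluded by Pre_

-- ===== PORT B =====
-- 'for j in range(1, (n-i)//2+1): if s[i:i+j] == s[i+j:i+2*j] and f[j-1] > best: best = f[j-1]'
def bInner (cs : List Char) (i jmax j : Nat) (f : List Int) (best : Int) : Int :=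
  if j > jmax then best
  else bInner cs i jmax (j+1) f
    (if PySem.List.slice cs (some (i : Int)) (some ((i + j : Nat) : Int))
          = PySem.List.slice cs (some ((i + j : Nat) : Int)) (some ((i + 2*j : Nat) : Int))
        ∧ best < f.getD (j-1) 0
     then f.getD (j-1) 0 else best)
termination_by jmax + 1 - j
decreasing_by omega

-- 'for i in range(n-1, -1, -1): ... f = [best+1] + f'
def bOuter (cs : List Char) (n : Nat) : Nat → List Int → List Int
  | 0, f => (bInner cs 0 (n / 2) 1 f 0 + 1) :: f
  | i+1, f => bOuter cs n i ((bInner cs (i+1) ((n - (i+1)) / 2) 1 f 0 + 1) :: f)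

def deleteString3_alt (s : String) : Int :=
  let cs := s.toList
  let n := cs.length
  if (PySem.Set.ofList cs).length = 1 then (n : Int)
  else
    let f := if n = 0 then ([] : List Int) else bOuter cs n (n-1) []
    (PySem.List.pyGet? f 0).getD 0   -- final return: first DP value; none = IndexError, excluded by Pre_

-- ===== PRECONDITION & SPEC =====
-- On the empty string A indexes an empty DP list and raises IndexError (B likewise);
-- Pre_ excludes exactly that input.
def Pre_deleteString3 (s : String) : Prop := s.toList ≠ []
instance (s : String) : Decidable (Pre_deleteString3 s) := by unfold Pre_deleteString3; infer_instance
def pvWitness_deleteString3 : String := "aab"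

def Spec_deleteString3 (s : String) (out : Int) : Prop := out = deleteString3_alt s
instance (s : String) (out : Int) : Decidable (Spec_deleteString3 s out) := by unfold Spec_deleteString3; infer_instance

-- ===== CLAIM (what is proved, stated in full; the proofs are below) =====
def Claim_equal_deleteString3 : Prop := ∀ (s : String), Dom_deleteString3 s → Pre_deleteString3 s → Spec_deleteString3 s (deleteString3 s)

-- ===== LEMMAS AND PROOFS =====

-- length of the longest common prefix of two suffixes (the meaning of A's lcp table)
def lcpLen : List Char → List Char → Nat
  | a :: u, b :: v => if a = b then lcpLen u v + 1 else 0
  | _, _ => 0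

-- the value A's finished table holds at (i, j)
def expE (cs : List Char) (i j : Nat) : Int :=
  if i < j ∧ j < cs.length then (lcpLen (cs.drop i) (cs.drop j) : Nat) else 0

-- ---------- list access helpers ----------
theorem getD_set_self (t : List (List Int)) (i : Nat) (r : List Int) (h : i < t.length) :
    (t.set i r).getD i [] = r := by
  simp [List.getD, h]

theorem getD_set_ne (t : List (List Int)) (i a : Nat) (r : List Int) (h : a ≠ i) :
    (t.set i r).getD a [] = t.getD a [] := by
  simp [List.getD, List.getElem?_set_ne (by omega : i ≠ a)]

theorem getD_set_self_int (t : List Int) (i : Nat) (v : Int) (h : i < t.length) :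
    (t.set i v).getD i 0 = v := by
  simp [List.getD, h]

theorem getD_set_ne_int (t : List Int) (i a : Nat) (v : Int) (h : a ≠ i) :
    (t.set i v).getD a 0 = t.getD a 0 := by
  simp [List.getD, List.getElem?_set_ne (by omega : i ≠ a)]

theorem set_append_len (xs : List Int) (y : Int) (ys : List Int) (v : Int) :
    (xs ++ y :: ys).set xs.length v = xs ++ v :: ys := by
  induction xs with
  | nil => rfl
  | cons x xs ih => simp [ih]

theorem set_repl (i : Nat) (b v : Int) (bf : List Int) :
    (List.replicate i (0:Int) ++ b :: bf).set i v = List.replicate i 0 ++ v :: bf := by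
  have h := set_append_len (List.replicate i (0:Int)) b bf v
  simp only [List.length_replicate] at h
  exact h

theorem getD_append_len (i : Nat) (b : Int) (bf : List Int) :
    (List.replicate i (0:Int) ++ b :: bf).getD i 0 = b := by
  simp [List.getD, List.length_replicate]

theorem getD_append_off (i j : Nat) (b : Int) (bf : List Int) (hj : 1 ≤ j) :
    (List.replicate i (0:Int) ++ b :: bf).getD (i+j) 0 = bf.getD (j-1) 0 := by
  obtain ⟨j', rfl⟩ : ∃ j', j = j' + 1 := ⟨j - 1, by omega⟩
  rw [List.getD, List.getElem?_append_right (by simp : (List.replicate i (0:Int)).length ≤ i + (j'+1))]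
  simp [List.getD]

theorem getD_replicate_zero (n m : Nat) : (List.replicate n (0:Int)).getD m 0 = 0 := by
  by_cases h : m < n
  · simp [List.getD, h]
  · rw [List.getD, List.getElem?_eq_none (by simp; omega)]; rfl

-- ---------- table shape ----------
def shapeN (t : List (List Int)) (n : Nat) : Prop :=
  t.length = n + 1 ∧ ∀ r ∈ t, r.length = n + 1

theorem shapeN_init (n : Nat) : shapeN (List.replicate (n+1) (List.replicate (n+1) (0:Int))) n := by
  constructor
  · simp
  · intro r hr
    simp [List.eq_of_mem_replicate hr]

theorem row_len (t : List (List Int)) (n i : Nat) (hsh : shapeN t n) (hi : i < t.length) :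
    (t.getD i []).length = n + 1 := by
  rw [List.getD_eq_getElem t [] hi]
  exact hsh.2 _ (t.getElem_mem hi)

theorem getD_replicate_or {α : Type} (m a : Nat) (x d : α) :
    (List.replicate m x).getD a d = x ∨ (List.replicate m x).getD a d = d := by
  by_cases h : a < m
  · left
    rw [List.getD_eq_getElem _ _ (by simp [h]), List.getElem_replicate]
  · right
    rw [List.getD, List.getElem?_eq_none (by simpa using Nat.le_of_not_lt h)]
    rfl

theorem getE_init (n a b : Nat) :
    getE (List.replicate (n+1) (List.replicate (n+1) (0:Int))) a b = 0 := by
  unfold getE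
  rcases getD_replicate_or (n+1) a (List.replicate (n+1) (0:Int)) [] with h | h <;> rw [h]
  · exact getD_replicate_zero _ _
  · rfl

-- ---------- table build ----------
theorem shapeN_aStep (cs : List Char) (i j n : Nat) (t : List (List Int)) (hsh : shapeN t n) :
    shapeN (aStep cs i j t) n := by
  unfold aStep
  split
  · by_cases hi : i < t.length
    · refine ⟨by simpa using hsh.1, ?_⟩
      intro r hr
      rcases List.mem_or_eq_of_mem_set hr with h | rfl
      · exact hsh.2 _ h
      · rw [List.length_set, row_len t n i hsh hi]
    · rw [List.set_eq_of_length_le (by omega)]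
      exact hsh
  · exact hsh

theorem getE_aStep (cs : List Char) (i j n : Nat) (t : List (List Int)) (hsh : shapeN t n)
    (hi : i ≤ n) (hj : j ≤ n) (a b : Nat) :
    getE (aStep cs i j t) a b =
      if a = i ∧ b = j ∧ cs.getD i ' ' = cs.getD j ' ' then getE t (i+1) (j+1) + 1
      else getE t a b := by
  unfold aStep
  by_cases hc : cs.getD i ' ' = cs.getD j ' '
  · rw [if_pos hc]
    have hit : i < t.length := by rw [hsh.1]; omega
    have hrow : (t.getD i []).length = n + 1 := row_len t n i hsh hit
    unfold getE
    by_cases ha : a = i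
    · subst ha
      rw [getD_set_self _ _ _ hit]
      by_cases hb : b = j
      · subst hb
        rw [getD_set_self_int _ _ _ (by omega)]
        rw [if_pos ⟨rfl, rfl, hc⟩]
      · rw [getD_set_ne_int _ _ _ _ hb, if_neg (by tauto)]
    · rw [getD_set_ne _ _ _ _ ha, if_neg (by tauto)]
  · rw [if_neg hc, if_neg (by tauto)]

theorem shapeN_aInner (cs : List Char) (i n : Nat) :
    ∀ (j : Nat) (t : List (List Int)), shapeN t n → shapeN (aInner cs i j t) n := by
  intro j
  induction j with
  | zero =>
    intro t hsh
    rw [aInner, if_pos (Nat.zero_le i)]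
    exact hsh
  | succ j ih =>
    intro t hsh
    rw [aInner]
    split
    · exact hsh
    · simpa using ih _ (shapeN_aStep cs i (j+1) n t hsh)

theorem getE_aInner (cs : List Char) (i n : Nat) (hi : i ≤ n) :
    ∀ (j : Nat) (t : List (List Int)), shapeN t n → j ≤ n → ∀ a b,
      getE (aInner cs i j t) a b =
        if a = i ∧ i < b ∧ b ≤ j then
          (if cs.getD i ' ' = cs.getD b ' ' then getE t (i+1) (b+1) + 1 else getE t i b)
        else getE t a b := by
  intro j
  induction j with
  | zero =>
    intro t hsh hj a b
    rw [aInner, if_pos (Nat.zero_le i), if_neg (by omega)]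
  | succ j ih =>
    intro t hsh hj a b
    rw [aInner]
    by_cases hji : j + 1 ≤ i
    · rw [if_pos hji, if_neg (by omega)]
    · rw [if_neg hji]
      simp only [Nat.add_sub_cancel]
      rw [ih (aStep cs i (j+1) t) (shapeN_aStep cs i (j+1) n t hsh) (by omega) a b]
      have hstep := getE_aStep cs i (j+1) n t hsh hi (by omega)
      have e1 : ∀ y : Nat, getE (aStep cs i (j+1) t) (i+1) y = getE t (i+1) y := by
        intro y; rw [hstep]; exact if_neg (by rintro ⟨h, -, -⟩; omega)
      have e2 : ∀ y : Nat, y ≠ j+1 → getE (aStep cs i (j+1) t) i y = getE t i y := by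
        intro y hy; rw [hstep]; exact if_neg (by rintro ⟨-, h, -⟩; exact hy h)
      have e3 : ∀ x y : Nat, x ≠ i → getE (aStep cs i (j+1) t) x y = getE t x y := by
        intro x y hx; rw [hstep]; exact if_neg (by rintro ⟨h, -, -⟩; exact hx h)
      by_cases ha : a = i
      · rw [ha]
        by_cases hb1 : i < b
        · by_cases hbj : b = j + 1
          · rw [hbj] at hb1 ⊢
            rw [if_neg (by omega), if_pos (show i = i ∧ i < j+1 ∧ j+1 ≤ j+1 from ⟨rfl, hb1, le_refl _⟩), hstep]
            by_cases hc : cs.getD i ' ' = cs.getD (j+1) ' '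
            · rw [if_pos ⟨rfl, rfl, hc⟩, if_pos hc]
            · rw [if_neg (by tauto), if_neg hc]
          · by_cases hb2 : b ≤ j
            · rw [e1 (b+1), e2 b hbj,
                  if_pos (show i = i ∧ i < b ∧ b ≤ j from ⟨rfl, hb1, hb2⟩),
                  if_pos (show i = i ∧ i < b ∧ b ≤ j+1 from ⟨rfl, hb1, by omega⟩)]
            · rw [if_neg (by omega), if_neg (by omega), e2 b hbj]
        · rw [if_neg (by omega), if_neg (by omega), e2 b (by omega)]
      · rw [if_neg (by tauto), if_neg (by tauto), e3 a b ha]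

theorem lcpLen_nil_right (u : List Char) : lcpLen u [] = 0 := by
  cases u <;> rfl

theorem row_final (cs : List Char) (n : Nat) (hcs : cs.length = n) (i : Nat) (hi : i < n)
    (t : List (List Int)) (hsh : shapeN t n)
    (habove : ∀ a b, i < a → getE t a b = expE cs a b)
    (hzero : ∀ a b, a ≤ i → getE t a b = 0) :
    ∀ a b, getE (aInner cs i (n-1) t) a b = if i ≤ a then expE cs a b else 0 := by
  intro a b
  rw [getE_aInner cs i n (le_of_lt hi) (n-1) t hsh (by omega) a b]
  by_cases ha : a = i
  · rw [ha]
    by_cases hb : i < b ∧ b ≤ n - 1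
    · rw [if_pos ⟨rfl, hb.1, hb.2⟩, if_pos (le_refl i)]
      have hin : i < cs.length := by omega
      have hbcs : b < cs.length := by omega
      rw [List.getD_eq_getElem cs ' ' hin, List.getD_eq_getElem cs ' ' hbcs]
      unfold expE
      rw [if_pos (show i < b ∧ b < cs.length from ⟨hb.1, by omega⟩)]
      rw [List.drop_eq_getElem_cons hin, List.drop_eq_getElem_cons hbcs]
      unfold lcpLen
      by_cases hc : cs[i] = cs[b]
      · rw [if_pos hc, if_pos hc]
        by_cases hbn : b + 1 < n
        · rw [habove (i+1) (b+1) (by omega)]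
          unfold expE
          rw [if_pos ⟨by omega, by omega⟩]
          push_cast
          ring
        · rw [habove (i+1) (b+1) (by omega)]
          unfold expE
          rw [if_neg (by omega)]
          rw [show List.drop (b+1) cs = [] from List.drop_eq_nil_of_le (by omega), lcpLen_nil_right]
          simp
      · rw [if_neg hc, if_neg hc, hzero i b (le_refl i)]
        simp
    · rw [if_neg (by omega), if_pos (le_refl i), hzero i b (le_refl i)]
      unfold expE
      rw [if_neg (by omega)]
  · by_cases hia : i < a
    · rw [if_neg (by omega), habove a b hia, if_pos (by omega)]
    · rw [if_neg (by omega), hzero a b (by omega), if_neg (by omega)]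

theorem getE_aOuter (cs : List Char) (n : Nat) (hcs : cs.length = n) :
    ∀ (i : Nat) (t : List (List Int)), i < n → shapeN t n →
      (∀ a b, i < a → getE t a b = expE cs a b) →
      (∀ a b, a ≤ i → getE t a b = 0) →
      ∀ a b, getE (aOuter cs n i t) a b = expE cs a b := by
  intro i
  induction i with
  | zero =>
    intro t h1 h2 h3 h4 a b
    show getE (aInner cs 0 (n-1) t) a b = expE cs a b
    rw [row_final cs n hcs 0 h1 t h2 h3 h4 a b, if_pos (Nat.zero_le a)]
  | succ i ih =>
    intro t h1 h2 h3 h4 a b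
    show getE (aOuter cs n i (aInner cs (i+1) (n-1) t)) a b = expE cs a b
    have hrf := row_final cs n hcs (i+1) h1 t h2 h3 h4
    refine ih (aInner cs (i+1) (n-1) t) (by omega) (shapeN_aInner cs (i+1) n (n-1) t h2) ?_ ?_ a b
    · intro a' b' ha'
      rw [hrf a' b', if_pos (by omega)]
    · intro a' b' ha'
      rw [hrf a' b', if_neg (by omega)]

-- ---------- lcp / slice characterisation ----------
theorem take_eq_iff_lcpLen : ∀ (j : Nat) (u v : List Char), j ≤ u.length → j ≤ v.length →
    (j ≤ lcpLen u v ↔ u.take j = v.take j) := by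
  intro j
  induction j with
  | zero => intro u v _ _; simp
  | succ j ih =>
    intro u v hu hv
    cases u with
    | nil => simp at hu
    | cons a u =>
      cases v with
      | nil => simp at hv
      | cons b v =>
        unfold lcpLen
        rw [List.take_succ_cons, List.take_succ_cons]
        have hiff := ih u v (by simpa using hu) (by simpa using hv)
        by_cases hab : a = b
        · subst hab
          rw [if_pos rfl]
          constructor
          · intro h
            rw [hiff.mp (by omega)]
          · intro h
            simp only [List.cons.injEq, true_and] at h
            have := hiff.mpr h
            omega
        · rw [if_neg hab]
          constructor
          · intro h
            exact absurd h (by omega)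
          · intro h
            simp only [List.cons.injEq] at h
            exact absurd h.1 hab

theorem guard_iff (cs : List Char) (n i j : Nat) (hcs : cs.length = n)
    (hj1 : 1 ≤ j) (hj2 : j ≤ (n - i) / 2) :
    ((j : Int) ≤ expE cs i (i+j)) ↔ ((cs.drop i).take j = (cs.drop (i+j)).take j) := by
  have h2 : 2 * j ≤ n - i := by omega
  have hlt : i + j < n := by omega
  unfold expE
  rw [if_pos ⟨by omega, by omega⟩]
  rw [Int.ofNat_le]
  exact take_eq_iff_lcpLen j (cs.drop i) (cs.drop (i+j))
    (by simp [hcs]; omega) (by simp [hcs]; omega)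

-- ---------- DP loops ----------
theorem inner_eq (cs : List Char) (n : Nat) (hcs : cs.length = n)
    (T : List (List Int)) (hT : ∀ a b, getE T a b = expE cs a b) (i : Nat) (hi : i < n) :
    ∀ (k j : Nat) (best : Int) (bf : List Int), 1 ≤ j → k = (n-i)/2 + 1 - j →
      aFInner T i ((n-i)/2) j (List.replicate i 0 ++ best :: bf)
        = List.replicate i 0 ++ (bInner cs i ((n-i)/2) j bf best) :: bf := by
  intro k
  induction k with
  | zero =>
    intro j best bf hj hk
    rw [aFInner, bInner, if_pos (show j > (n-i)/2 from by omega),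
        if_pos (show j > (n-i)/2 from by omega)]
  | succ k ih =>
    intro j best bf hj hk
    have hle : j ≤ (n-i)/2 := by omega
    rw [aFInner, bInner, if_neg (show ¬ j > (n-i)/2 from by omega),
        if_neg (show ¬ j > (n-i)/2 from by omega)]
    simp only [getD_append_len, getD_append_off i j best bf hj, hT,
      PySem.List.slice_natCast,
      show i + j - i = j from by omega, show i + 2*j - (i+j) = j from by omega]
    have hg := guard_iff cs n i j hcs hj hle
    by_cases hs : (cs.drop i).take j = (cs.drop (i+j)).take j
    · rw [if_pos (hg.mpr hs), set_repl]
      rw [ih (j+1) (max best (bf.getD (j-1) 0)) bf (by omega) (by omega)]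
      have hbx : max best (bf.getD (j-1) 0)
          = if ((cs.drop i).take j = (cs.drop (i+j)).take j ∧ best < bf.getD (j-1) 0)
            then bf.getD (j-1) 0 else best := by
        by_cases hlt : best < bf.getD (j-1) 0
        · rw [if_pos ⟨hs, hlt⟩]
          exact max_eq_right (le_of_lt hlt)
        · rw [if_neg (by tauto)]
          exact max_eq_left (by omega)
      rw [hbx]
    · rw [if_neg (fun h => hs (hg.mp h))]
      rw [ih (j+1) best bf (by omega) (by omega)]
      rw [if_neg (by tauto)]

theorem outer_eq (cs : List Char) (n : Nat) (hcs : cs.length = n)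
    (T : List (List Int)) (hT : ∀ a b, getE T a b = expE cs a b) :
    ∀ (i : Nat) (bf : List Int), i < n →
      aFOuter T n i (List.replicate (i+1) 0 ++ bf) = bOuter cs n i bf := by
  intro i
  induction i with
  | zero =>
    intro bf h0
    simp only [aFOuter, bOuter]
    have h1 : List.replicate 1 (0:Int) ++ bf = List.replicate 0 (0:Int) ++ (0:Int) :: bf := rfl
    have hin := inner_eq cs n hcs T hT 0 h0 ((n-0)/2 + 1 - 1) 1 0 bf (le_refl 1) rfl
    simp only [Nat.sub_zero] at hin
    rw [h1, hin]
    simp [List.getD]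
  | succ i ih =>
    intro bf hn
    simp only [aFOuter, bOuter]
    have hsplit : List.replicate (i+1+1) (0:Int) ++ bf
        = List.replicate (i+1) (0:Int) ++ (0:Int) :: bf := by
      simp [List.replicate_succ']
    rw [hsplit, inner_eq cs n hcs T hT (i+1) hn ((n-(i+1))/2 + 1 - 1) 1 0 bf (le_refl 1) (by omega)]
    rw [getD_append_len, set_repl]
    exact ih ((bInner cs (i+1) ((n-(i+1))/2) 1 bf 0 + 1) :: bf) (by omega)

-- ===== VERDICT (by name: the statement is the Claim_ definition above) =====
theorem deleteString3_spec : Claim_equal_deleteString3 := by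
  intro s _hd hpre
  unfold Spec_deleteString3 deleteString3 deleteString3_alt
  dsimp only
  by_cases hset : (PySem.Set.ofList s.toList).length = 1
  · rw [if_pos hset, if_pos hset]
  · have hn : ¬ s.toList.length = 0 := by
      intro h
      exact hpre (List.eq_nil_of_length_eq_zero h)
    rw [if_neg hset, if_neg hset, if_neg hn, if_neg hn, if_neg hn]
    have hT := getE_aOuter s.toList s.toList.length rfl (s.toList.length - 1)
      (List.replicate (s.toList.length + 1) (List.replicate (s.toList.length + 1) (0:Int)))
      (by omega) (shapeN_init _)
      (fun a b ha => by
        rw [getE_init]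
        unfold expE
        rw [if_neg (by omega)])
      (fun a b _ => getE_init _ a b)
    have hmain := outer_eq s.toList s.toList.length rfl _ hT (s.toList.length - 1) [] (by omega)
    rw [show List.replicate s.toList.length (0:Int)
          = List.replicate ((s.toList.length - 1) + 1) 0 ++ [] from by
        rw [List.append_nil]; congr 1; omega]
    rw [hmain]
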